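-- pv_equiv track=rewrite | github.com/son-ha-264/Graph2SMILES | draft.py | flatten_and_map
-- ===== SOURCE A (Python) =====
-- from typing import List
--
-- def flatten_and_map(data: List):
--     flattened = []
--     mapping = {}
--     offset = 0
--
--     for i, item in enumerate(data):
--
--         flattened.extend(item)
--         mapping[i] = list(range(offset, offset + len(item)))
--         offset += len(item)
--
--     return flattened, mapping
-- ===== SOURCE B (Python) =====
-- def flatten_and_map(data):
--     lengths = [len(item) for item in data]
--     offsets = [0]
--     for n in lengths:
--         offsets.append(offsets[-1] + n)
--     flattened = [v for item in data for v in item]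
--     mapping = {i: list(range(offsets[i], offsets[i + 1])) for i in range(len(data))}
--     return flattened, mapping
-- ===== Notes on version B (the rewrite author's own statement) =====
-- stated objective: alternative
-- what changed: Replaces the single fused loop with a running offset accumulator by separate passes: a lengths list, a prefix-sum offsets table, a flat comprehension for the flattened list, and a dict comprehension indexing the offsets table.
import Mathlib
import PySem

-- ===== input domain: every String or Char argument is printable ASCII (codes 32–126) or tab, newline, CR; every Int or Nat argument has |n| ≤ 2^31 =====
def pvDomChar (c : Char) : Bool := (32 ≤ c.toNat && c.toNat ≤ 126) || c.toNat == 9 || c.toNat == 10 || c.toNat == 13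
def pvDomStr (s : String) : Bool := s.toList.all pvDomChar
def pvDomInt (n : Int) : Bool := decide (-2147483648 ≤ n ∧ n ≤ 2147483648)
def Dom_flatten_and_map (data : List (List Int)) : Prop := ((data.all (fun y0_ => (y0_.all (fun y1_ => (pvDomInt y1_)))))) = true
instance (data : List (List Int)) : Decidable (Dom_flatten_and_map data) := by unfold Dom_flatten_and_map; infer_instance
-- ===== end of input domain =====

-- B computes the same (flattened, mapping) pair by separate passes (lengths, a prefix-sum
-- offsets table, a flat comprehension, a dict comprehension) instead of A's fused loop
-- with a running offset; objective: alternative decomposition, same cost.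

-- ===== PORT A =====
def flatten_and_map (data : List (List Int)) : List Int × (List (Int × List Int)) :=
  let st := (PySem.List.enumerate data).foldl
    (fun (st : List Int × PySem.Dict Int (List Int) × Int) ip =>
      (st.1 ++ ip.2,
       st.2.1.insert ip.1 (PySem.List.pyRange st.2.2 (st.2.2 + ip.2.length) 1),
       st.2.2 + (ip.2.length : Int)))
    ([], PySem.Dict.empty, 0)
  (st.1, st.2.1.items)

-- ===== PORT B =====
def flatten_and_map_alt (data : List (List Int)) : List Int × (List (Int × List Int)) :=
  let lengths := data.map (fun item => (item.length : Int))
  let offsets := lengths.foldl (fun acc n => acc ++ [PySem.List.pyGetD acc (-1) 0 + n]) [0]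
  let flattened := data.flatMap (fun item => item)
  let mapping := (PySem.List.pyRange 0 (data.length : Int) 1).foldl
    (fun (d : PySem.Dict Int (List Int)) i =>
      d.insert i (PySem.List.pyRange (PySem.List.pyGetD offsets i 0)
                                     (PySem.List.pyGetD offsets (i + 1) 0) 1))
    PySem.Dict.empty
  (flattened, mapping.items)

-- ===== PRECONDITION & SPEC =====
def Spec_flatten_and_map (data : List (List Int)) (out : List Int × (List (Int × List Int))) : Prop := out = flatten_and_map_alt data
instance (data : List (List Int)) (out : List Int × (List (Int × List Int))) : Decidable (Spec_flatten_and_map data out) := by unfold Spec_flatten_and_map; infer_instance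

-- ===== CLAIM (what is proved, stated in full; the proofs are below) =====
def Claim_equal_flatten_and_map : Prop := ∀ (data : List (List Int)), Dom_flatten_and_map data → Spec_flatten_and_map data (flatten_and_map data)

-- ===== LEMMAS AND PROOFS =====

-- the common canonical value: group i ↦ (key, indices) with running start offset
def pvMapList : List (List Int) → Int → Int → List (Int × List Int)
  | [], _, _ => []
  | x :: xs, s, off =>
      (s, PySem.List.pyRange off (off + (x.length : Int)) 1) :: pvMapList xs (s + 1) (off + (x.length : Int))

-- B's offsets table, recursively
def pvOffs : List (List Int) → Int → List Int
  | [], off => [off]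
  | x :: xs, off => off :: pvOffs xs (off + (x.length : Int))

lemma pvOffs_getD_zero (ls : List (List Int)) (off d : Int) : (pvOffs ls off).getD 0 d = off := by
  cases ls <;> rfl

lemma A_fold (data : List (List Int)) : ∀ (s off : Int) (fl : List Int) (d : PySem.Dict Int (List Int)),
    (∀ k, d.contains k = true → k < s) →
    ((PySem.List.enumerate data s).foldl
      (fun (st : List Int × PySem.Dict Int (List Int) × Int) ip =>
        (st.1 ++ ip.2,
         st.2.1.insert ip.1 (PySem.List.pyRange st.2.2 (st.2.2 + ip.2.length) 1),
         st.2.2 + (ip.2.length : Int)))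
      (fl, d, off)).1 = fl ++ data.flatten ∧
    ((PySem.List.enumerate data s).foldl
      (fun (st : List Int × PySem.Dict Int (List Int) × Int) ip =>
        (st.1 ++ ip.2,
         st.2.1.insert ip.1 (PySem.List.pyRange st.2.2 (st.2.2 + ip.2.length) 1),
         st.2.2 + (ip.2.length : Int)))
      (fl, d, off)).2.1.items = d.items ++ pvMapList data s off := by
  induction data with
  | nil => intro s off fl d _; simp [PySem.List.enumerate_nil, pvMapList]
  | cons x xs ih =>
    intro s off fl d hd
    rw [PySem.List.enumerate_cons]
    simp only [List.foldl_cons]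
    have hfresh : d.contains s = false := by
      by_cases h : d.contains s = true
      · exact absurd (hd s h) (lt_irrefl s)
      · simpa using h
    have hd' : ∀ k, (d.insert s (PySem.List.pyRange off (off + (x.length : Int)) 1)).contains k = true → k < s + 1 := by
      intro k hk
      rw [PySem.Dict.contains_insert] at hk
      rcases Bool.or_eq_true_iff.mp hk with h | h
      · have : k = s := by simpa using h
        omega
      · have := hd k h; omega
    obtain ⟨h1, h2⟩ := ih (s + 1) (off + (x.length : Int)) (fl ++ x)
      (d.insert s (PySem.List.pyRange off (off + (x.length : Int)) 1)) hd'
    refine ⟨?_, ?_⟩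
    · simpa [List.append_assoc] using h1
    · rw [h2, PySem.Dict.items_insert]
      simp [hfresh, pvMapList, List.append_assoc]

lemma A_canon (data : List (List Int)) :
    flatten_and_map data = (data.flatten, pvMapList data 0 0) := by
  obtain ⟨h1, h2⟩ := A_fold data 0 0 [] PySem.Dict.empty
    (by intro k hk; simp [PySem.Dict.contains_empty] at hk)
  unfold flatten_and_map
  exact Prod.ext (by simpa using h1) (by simpa using h2)

lemma B_offs (ls : List (List Int)) : ∀ (off : Int) (acc : List Int),
    (ls.map (fun item => (item.length : Int))).foldl
      (fun acc n => acc ++ [PySem.List.pyGetD acc (-1) 0 + n]) (acc ++ [off])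
    = acc ++ pvOffs ls off := by
  induction ls with
  | nil => intro off acc; simp [pvOffs]
  | cons x xs ih =>
    intro off acc
    simp only [List.map_cons, List.foldl_cons]
    rw [PySem.List.pyGetD_neg_one_append_singleton]
    have := ih (off + (x.length : Int)) (acc ++ [off])
    rw [this]
    simp [pvOffs]

lemma pv_pyGetD_succ (a : Int) (l : List Int) (k : Nat) (d : Int) :
    PySem.List.pyGetD (a :: l) ((k : Int) + 1) d = PySem.List.pyGetD l (k : Int) d := by
  have : ((k : Int) + 1) = (((k + 1 : Nat) : Int)) := by push_cast; ring
  rw [this, PySem.List.pyGetD_natCast, PySem.List.pyGetD_natCast]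
  simp

lemma B_map_offs (ls : List (List Int)) : ∀ (s off : Int),
    (List.range ls.length).map
      (fun (k : Nat) => ((s + (k : Int) : Int),
        PySem.List.pyRange (PySem.List.pyGetD (pvOffs ls off) (k : Int) 0)
                           (PySem.List.pyGetD (pvOffs ls off) ((k : Int) + 1) 0) 1))
    = pvMapList ls s off := by
  induction ls with
  | nil => intro s off; simp [pvMapList]
  | cons x xs ih =>
    intro s off
    rw [List.length_cons, List.range_succ_eq_map, List.map_cons, List.map_map]
    have hoff : pvOffs (x :: xs) off = off :: pvOffs xs (off + (x.length : Int)) := rfl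
    have hmap : pvMapList (x :: xs) s off =
        (s, PySem.List.pyRange off (off + (x.length : Int)) 1) ::
          pvMapList xs (s + 1) (off + (x.length : Int)) := rfl
    rw [hoff, hmap]
    congr 1
    · have h0 : PySem.List.pyGetD (off :: pvOffs xs (off + (x.length : Int))) 0 0 = off :=
        PySem.List.pyGetD_zero_cons off (pvOffs xs (off + (x.length : Int))) 0
      have h1 : PySem.List.pyGetD (off :: pvOffs xs (off + (x.length : Int))) (0 + 1) 0
          = off + (x.length : Int) := by
        have he : ((0 : Int) + 1) = (((0 : Nat) : Int) + 1) := by norm_num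
        rw [he, pv_pyGetD_succ, PySem.List.pyGetD_natCast]
        exact pvOffs_getD_zero xs (off + (x.length : Int)) 0
      rw [Nat.cast_zero, add_zero, h0, h1]
    · rw [← ih (s + 1) (off + (x.length : Int))]
      apply List.map_congr_left
      intro k _
      simp only [Function.comp_apply]
      have e1 : ((Nat.succ k : Nat) : Int) = (k : Int) + 1 := by push_cast; ring
      rw [e1, pv_pyGetD_succ]
      have e2 : ((k : Int) + 1 + 1) = (((k + 1 : Nat) : Int) + 1) := by push_cast; ring
      rw [e2, pv_pyGetD_succ]
      have e3 : ((k + 1 : Nat) : Int) = (k : Int) + 1 := by push_cast; ring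
      rw [e3]
      congr 1
      ring

theorem B_canon (data : List (List Int)) :
    flatten_and_map_alt data = (data.flatten, pvMapList data 0 0) := by
  unfold flatten_and_map_alt
  have hoffs : (data.map (fun item => (item.length : Int))).foldl
      (fun acc n => acc ++ [PySem.List.pyGetD acc (-1) 0 + n]) [0] = pvOffs data 0 := by
    simpa using B_offs data 0 []
  have hfresh : ∀ i ∈ PySem.List.pyRange 0 (data.length : Int) 1,
      (PySem.Dict.empty : PySem.Dict Int (List Int)).contains i = false := by
    intro i _; simp [PySem.Dict.contains_empty]
  refine Prod.ext ?_ ?_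
  · simp
  · simp only [hoffs]
    rw [PySem.Dict.items_foldl_insert_fresh _ _ _ _ hfresh (by simpa using PySem.List.nodup_pyRange_one 0 (data.length : Int))]
    rw [PySem.List.pyRange_one]
    simp only [Int.sub_zero, Int.toNat_natCast, List.map_map]
    rw [← B_map_offs data 0 0]
    apply List.map_congr_left
    intro k _
    simp

-- ===== VERDICT (by name: the statement is the Claim_ definition above) =====
theorem flatten_and_map_spec : Claim_equal_flatten_and_map := by
  intro data _
  unfold Spec_flatten_and_map
  rw [A_canon, B_canon]
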